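-- pv_equiv track=rewrite | github.com/NIAN-QIAO/2023SPRING | Array/Traversal/414thirdMax.py | thirdMax
-- ===== SOURCE A (Python) =====
-- from typing import List
--
-- def thirdMax(nums: List[int]) -> int:
--     nums.sort(reverse=True)
--     max_num = temp = nums[0]
--     count = 0
--     for i, element in enumerate(nums):
--         if element < temp and count < 2:
--             temp = element
--             count += 1
--         if count == 2:
--             return temp
--     return max_num
-- ===== SOURCE B (Python) =====
-- from typing import List
--
-- def thirdMax(nums: List[int]) -> int:
--     # single pass keeping the top three distinct values seen so far
--     a = b = c = None
--     for x in nums: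
--         if x == a or x == b or x == c:
--             continue
--         if a is None or x > a:
--             a, b, c = x, a, b
--         elif b is None or x > b:
--             b, c = x, b
--         elif c is None or x > c:
--             c = x
--     return c if c is not None else a
-- ===== Notes on version B (the rewrite author's own statement) =====
-- stated objective: alternative
-- what changed: replaced sort-then-scan (sort descending, count strict drops) by a single pass maintaining the top three distinct values in three registers
import Mathlib
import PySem

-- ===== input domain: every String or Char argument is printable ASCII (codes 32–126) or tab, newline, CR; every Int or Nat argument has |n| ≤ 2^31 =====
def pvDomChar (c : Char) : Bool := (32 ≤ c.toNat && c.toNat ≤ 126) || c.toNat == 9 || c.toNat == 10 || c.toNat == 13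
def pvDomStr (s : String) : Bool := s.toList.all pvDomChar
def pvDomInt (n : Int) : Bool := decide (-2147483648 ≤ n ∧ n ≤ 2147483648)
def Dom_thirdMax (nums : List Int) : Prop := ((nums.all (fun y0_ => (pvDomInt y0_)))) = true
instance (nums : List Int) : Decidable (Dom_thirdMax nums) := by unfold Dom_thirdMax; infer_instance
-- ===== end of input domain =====

-- B replaces A's sort-then-scan by a single pass keeping the top three distinct values;
-- A sorts nums in place (a side effect B does not have) — the equivalence is about the return value only.


-- ===== PORT A =====
-- the for-loop of A, over the sorted list, with state (temp, count)
def thirdMaxLoop (temp : Int) (count : Int) (maxNum : Int) : List Int → Int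
  | [] => maxNum
  | x :: xs =>
    let p := if x < temp ∧ count < 2 then (x, count + 1) else (temp, count)
    if p.2 = 2 then p.1 else thirdMaxLoop p.1 p.2 maxNum xs

def thirdMax (nums : List Int) : Int :=
  match PySem.List.sorted nums (fun x => x) true with
  | [] => 0   -- reading the first element raises IndexError here; excluded by Pre_thirdMax
  | h :: t => thirdMaxLoop h 0 h (h :: t)

-- ===== PORT B =====
-- "a is None or x > a"
def tmAbove (a : Option Int) (x : Int) : Bool :=
  match a with
  | none => true
  | some v => x > v

-- one step of B's loop on the state (a, b, c)
def tmUpd (s : Option Int × Option Int × Option Int) (x : Int) :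
    Option Int × Option Int × Option Int :=
  let (a, b, c) := s
  if a = some x ∨ b = some x ∨ c = some x then (a, b, c)
  else if tmAbove a x then (some x, a, b)
  else if tmAbove b x then (a, some x, b)
  else if tmAbove c x then (a, b, some x)
  else (a, b, c)

def thirdMax_alt (nums : List Int) : Int :=
  let s := nums.foldl tmUpd (none, none, none)
  match s.2.2 with
  | some v => v
  | none =>
    match s.1 with
    | some v => v
    | none => 0   -- Python B returns None here (empty list); excluded by Pre_thirdMax

-- ===== PRECONDITION & SPEC =====
-- A reads the first element, which raises IndexError on the empty list; Pre_ excludes exactly that.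
def Pre_thirdMax (nums : List Int) : Prop := nums ≠ []
instance (nums : List Int) : Decidable (Pre_thirdMax nums) := by unfold Pre_thirdMax; infer_instance

def pvWitness_thirdMax : List Int := ([2, 3, 1, 3])

def Spec_thirdMax (nums : List Int) (out : Int) : Prop := out = thirdMax_alt nums
instance (nums : List Int) (out : Int) : Decidable (Spec_thirdMax nums out) := by unfold Spec_thirdMax; infer_instance

-- ===== CLAIM (what is proved, stated in full; the proofs are below) =====
def Claim_equal_thirdMax : Prop := ∀ (nums : List Int), Dom_thirdMax nums → Pre_thirdMax nums → Spec_thirdMax nums (thirdMax nums)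

-- ===== LEMMAS AND PROOFS =====

-- maximum of a list, as an Option (proof helper)
def maxO : List Int → Option Int
  | [] => none
  | x :: xs => some (xs.foldl max x)

theorem fm_ub (xs : List Int) : ∀ x, ∀ y ∈ x :: xs, y ≤ xs.foldl max x := by
  induction xs with
  | nil => intro x y hy; simp_all
  | cons z zs ih =>
    intro x y hy
    rw [List.foldl_cons]
    rcases List.mem_cons.mp hy with rfl | hy'
    · exact le_trans (le_max_left y z) (ih (max y z) _ (by simp))
    · rcases List.mem_cons.mp hy' with rfl | hy''
      · exact le_trans (le_max_right x y) (ih (max x y) _ (by simp))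
      · exact ih (max x z) y (by simp [hy''])

theorem fm_mem (xs : List Int) : ∀ x, xs.foldl max x ∈ x :: xs := by
  induction xs with
  | nil => intro x; simp
  | cons z zs ih =>
    intro x
    rw [List.foldl_cons]
    rcases max_choice x z with hm | hm
    · rw [hm]
      rcases List.mem_cons.mp (ih x) with h' | h' <;> simp [h']
    · rw [hm]
      rcases List.mem_cons.mp (ih z) with h' | h' <;> simp [h']

theorem maxO_eq_some_iff (l : List Int) (m : Int) :
    maxO l = some m ↔ m ∈ l ∧ ∀ y ∈ l, y ≤ m := by
  cases l with
  | nil => simp [maxO]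
  | cons x xs =>
    simp only [maxO, Option.some.injEq]
    constructor
    · rintro rfl; exact ⟨fm_mem xs x, fm_ub xs x⟩
    · rintro ⟨hm, hub⟩
      have h1 := fm_ub xs x m hm
      have h2 := hub _ (fm_mem xs x)
      omega

theorem maxO_eq_none_iff (l : List Int) : maxO l = none ↔ l = [] := by
  cases l <;> simp [maxO]

theorem maxO_perm {l l' : List Int} (hp : l.Perm l') : maxO l = maxO l' := by
  cases h : maxO l' with
  | none =>
    rw [maxO_eq_none_iff] at h
    subst h
    have hlen := hp.length_eq
    rw [maxO_eq_none_iff]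
    cases l with
    | nil => rfl
    | cons y ys => simp at hlen
  | some m =>
    rw [maxO_eq_some_iff] at h ⊢
    exact ⟨hp.mem_iff.mpr h.1, fun y hy => h.2 y (hp.subset hy)⟩

theorem maxO_append_singleton (l : List Int) (x : Int) :
    maxO (l ++ [x]) = some (match maxO l with | none => x | some m => max m x) := by
  cases l with
  | nil => simp [maxO]
  | cons h t => simp [maxO, List.foldl_append]

-- the elements of l strictly below m (proof helper)
def blw (l : List Int) (m : Int) : List Int := l.filter (fun y => decide (y < m))

theorem blw_append (l : List Int) (x m : Int) :
    blw (l ++ [x]) m = blw l m ++ if x < m then [x] else [] := by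
  simp only [blw, List.filter_append]
  congr 1
  split_ifs with h <;> simp [h]

-- the state B's loop has reached after scanning l, described by maxima
def st (l : List Int) : Option Int × Option Int × Option Int :=
  match maxO l with
  | none => (none, none, none)
  | some a =>
    match maxO (blw l a) with
    | none => (some a, none, none)
    | some b =>
      match maxO (blw l b) with
      | none => (some a, some b, none)
      | some c => (some a, some b, some c)

theorem st_perm {l l' : List Int} (hp : l.Perm l') : st l = st l' := by
  have e2 : ∀ m : Int, maxO (blw l m) = maxO (blw l' m) :=
    fun m => maxO_perm (hp.filter _)
  unfold st
  rw [maxO_perm hp]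
  cases maxO l' with
  | none => rfl
  | some a =>
    dsimp only
    rw [e2 a]
    cases maxO (blw l' a) with
    | none => rfl
    | some b =>
      dsimp only
      rw [e2 b]

theorem st_append (l : List Int) (x : Int) : st (l ++ [x]) = tmUpd (st l) x := by
  cases hA : maxO l with
  | none =>
    rw [maxO_eq_none_iff] at hA
    subst hA
    simp [st, maxO, blw, tmUpd, tmAbove, List.filter]
  | some a =>
    obtain ⟨haM, haU⟩ := (maxO_eq_some_iff l a).mp hA
    have hAx : maxO (l ++ [x]) = some (max a x) := by rw [maxO_append_singleton, hA]
    rcases lt_trichotomy a x with hax | hax | hax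
    · -- x is a new maximum
      have hmax : max a x = x := by omega
      have h1 : blw (l ++ [x]) x = l := by
        rw [blw_append, if_neg (lt_irrefl x), List.append_nil]
        unfold blw
        refine List.filter_eq_self.mpr (fun y hy => ?_)
        simp only [decide_eq_true_eq]
        exact lt_of_le_of_lt (haU y hy) hax
      have h2 : blw (l ++ [x]) a = blw l a := by
        rw [blw_append]; simp [not_lt.mpr (le_of_lt hax)]
      cases hB : maxO (blw l a) with
      | none =>
        simp only [st, hAx, hmax, h1, hA, h2, hB, tmUpd, tmAbove]
        split_ifs <;> simp_all <;> omega
      | some b =>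
        have hbM := (maxO_eq_some_iff _ _).mp hB
        have hba : b < a := by
          have := hbM.1; simp [blw, List.mem_filter] at this; omega
        cases hC : maxO (blw l b) with
        | none =>
          simp only [st, hAx, hmax, h1, hA, h2, hB, hC, tmUpd, tmAbove]
          split_ifs <;> simp_all <;> omega
        | some c =>
          have hcb : c < b := by
            have := ((maxO_eq_some_iff _ _).mp hC).1
            simp [blw, List.mem_filter] at this; omega
          simp only [st, hAx, hmax, h1, hA, h2, hB, hC, tmUpd, tmAbove]
          split_ifs <;> simp_all <;> omega
    · -- x equals the maximum: nothing changes
      subst hax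
      have hmax : max a a = a := by omega
      have h2 : blw (l ++ [a]) a = blw l a := by
        rw [blw_append]; simp
      cases hB : maxO (blw l a) with
      | none =>
        simp only [st, hAx, hmax, h2, hB, tmUpd, tmAbove]
        split_ifs <;> simp_all
      | some b =>
        have hba : b < a := by
          have := ((maxO_eq_some_iff _ _).mp hB).1
          simp [blw, List.mem_filter] at this; omega
        have h3 : blw (l ++ [a]) b = blw l b := by
          rw [blw_append]; simp [not_lt.mpr (le_of_lt hba)]
        cases hC : maxO (blw l b) with
        | none =>
          simp only [st, hAx, hmax, h2, hB, h3, hC, tmUpd, tmAbove]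
          split_ifs <;> simp_all
        | some c =>
          simp only [st, hAx, hmax, h2, hB, h3, hC, tmUpd, tmAbove]
          split_ifs <;> simp_all
    · -- x below the maximum
      have hmax : max a x = a := by omega
      have h2 : blw (l ++ [x]) a = blw l a ++ [x] := by
        rw [blw_append]; simp [hax]
      cases hB : maxO (blw l a) with
      | none =>
        -- no element of l is < a; second register becomes x, third stays empty
        have hemp : blw l a = [] := (maxO_eq_none_iff _).mp hB
        have hnone : ∀ y ∈ l, ¬ y < a := by
          intro y hy hlt
          have : y ∈ blw l a := by simp [blw, List.mem_filter, hy, hlt]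
          simp [hemp] at this
        have hBx : maxO (blw (l ++ [x]) a) = some x := by
          rw [h2, hemp]; simp [maxO]
        have h3 : blw (l ++ [x]) x = [] := by
          rw [blw_append, if_neg (lt_irrefl x), List.append_nil]
          unfold blw
          refine List.filter_eq_nil_iff.mpr (fun y hy => ?_)
          simp only [decide_eq_true_eq]
          have := hnone y hy
          omega
        simp only [st, hAx, hmax, hBx, h3, hA, hB, tmUpd, tmAbove,
          show maxO ([] : List Int) = none from rfl]
        split_ifs <;> simp_all <;> omega
      | some b =>
        obtain ⟨hbM', hbU⟩ := (maxO_eq_some_iff _ _).mp hB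
        have hbmem : b ∈ l ∧ b < a := by
          have := hbM'; simp [blw, List.mem_filter] at this; exact this
        have hba : b < a := hbmem.2
        rcases lt_trichotomy b x with hbx | hbx | hbx
        · -- b < x < a : x becomes the second register, b the third
          have hBx : maxO (blw (l ++ [x]) a) = some x := by
            rw [h2, maxO_append_singleton, hB]
            simp [show max b x = x by omega]
          have h3 : blw (l ++ [x]) x = blw l x := by
            rw [blw_append]; simp
          have hCx : maxO (blw l x) = some b := by
            rw [maxO_eq_some_iff]
            refine ⟨by simp [blw, List.mem_filter, hbmem.1, hbx], ?_⟩
            intro y hy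
            simp only [blw, List.mem_filter, decide_eq_true_eq] at hy
            exact hbU y (by simp [blw, List.mem_filter, hy.1]; omega)
          cases hC : maxO (blw l b) with
          | none =>
            simp only [st, hAx, hmax, hBx, h3, hCx, hA, hB, hC, tmUpd, tmAbove]
            split_ifs <;> simp_all <;> omega
          | some c =>
            have hcb : c < b := by
              have := ((maxO_eq_some_iff _ _).mp hC).1
              simp [blw, List.mem_filter] at this; omega
            simp only [st, hAx, hmax, hBx, h3, hCx, hA, hB, hC, tmUpd, tmAbove]
            split_ifs <;> simp_all <;> omega
        · -- x = b : nothing changes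
          subst hbx
          have hBx : maxO (blw (l ++ [b]) a) = some b := by
            rw [h2, maxO_append_singleton, hB]
            simp
          have h3 : blw (l ++ [b]) b = blw l b := by
            rw [blw_append]; simp
          cases hC : maxO (blw l b) with
          | none =>
            simp only [st, hAx, hmax, hBx, h3, hA, hB, hC, tmUpd, tmAbove]
            split_ifs <;> simp_all
          | some c =>
            simp only [st, hAx, hmax, hBx, h3, hA, hB, hC, tmUpd, tmAbove]
            split_ifs <;> simp_all
        · -- x < b : only the third register can change
          have hBx : maxO (blw (l ++ [x]) a) = some b := by
            rw [h2, maxO_append_singleton, hB]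
            simp [show max b x = b by omega]
          have h3 : blw (l ++ [x]) b = blw l b ++ [x] := by
            rw [blw_append]; simp [hbx]
          cases hC : maxO (blw l b) with
          | none =>
            have hemp : blw l b = [] := (maxO_eq_none_iff _).mp hC
            have hCx : maxO (blw (l ++ [x]) b) = some x := by
              rw [h3, hemp]; simp [maxO]
            simp only [st, hAx, hmax, hBx, hCx, hA, hB, hC, tmUpd, tmAbove]
            split_ifs <;> simp_all <;> omega
          | some c =>
            have hcb : c < b := by
              have := ((maxO_eq_some_iff _ _).mp hC).1
              simp [blw, List.mem_filter] at this; omega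
            have hCx : maxO (blw (l ++ [x]) b) = some (max c x) := by
              rw [h3, maxO_append_singleton, hC]
            rcases lt_trichotomy c x with hcx | hcx | hcx
            · simp only [st, hAx, hmax, hBx, hCx, hA, hB, hC,
                show max c x = x by omega, tmUpd, tmAbove]
              split_ifs <;> simp_all <;> omega
            · subst hcx
              simp only [st, hAx, hmax, hBx, hCx, hA, hB, hC,
                show max c c = c by omega, tmUpd, tmAbove]
              split_ifs <;> simp_all
            · simp only [st, hAx, hmax, hBx, hCx, hA, hB, hC,
                show max c x = c by omega, tmUpd, tmAbove]
              split_ifs <;> simp_all <;> omega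

theorem fold_eq_st (l : List Int) : l.foldl tmUpd (none, none, none) = st l := by
  induction l using List.reverseRecOn with
  | nil => rfl
  | append_singleton l x ih =>
    rw [List.foldl_append, List.foldl_cons, List.foldl_nil, ih, ← st_append]

def tmOut (s : Option Int × Option Int × Option Int) : Int :=
  match s.2.2 with
  | some v => v
  | none =>
    match s.1 with
    | some v => v
    | none => 0

-- once three distinct values a > b > c are held and everything left is ≤ c, the state is frozen
theorem tm_frozen (t : List Int) : ∀ (a b c : Int), c < b → b < a →
    (∀ x ∈ t, x ≤ c) → t.foldl tmUpd (some a, some b, some c) = (some a, some b, some c) := by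
  induction t with
  | nil => intro a b c _ _ _; rfl
  | cons x xs ih =>
    intro a b c hcb hba hle
    have hx : x ≤ c := hle x (by simp)
    have hstep : tmUpd (some a, some b, some c) x = (some a, some b, some c) := by
      simp only [tmUpd, tmAbove]
      split_ifs <;> simp_all <;> omega
    simp only [List.foldl_cons, hstep]
    exact ih a b c hcb hba (fun y hy => hle y (by simp [hy]))

-- phase 1: one strict drop seen (A: temp = b, count = 1  /  B: (some a, some b, none))
theorem tm_phase1 (t : List Int) : ∀ (a b : Int), b < a →
    t.Pairwise (fun p q => q ≤ p) → (∀ x ∈ t, x ≤ b) →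
    thirdMaxLoop b 1 a t = tmOut (t.foldl tmUpd (some a, some b, none)) := by
  induction t with
  | nil => intro a b _ _ _; rfl
  | cons x xs ih =>
    intro a b hba hpw hle
    have hx : x ≤ b := hle x (by simp)
    have hxs : ∀ y ∈ xs, y ≤ x := (List.pairwise_cons.mp hpw).1
    rcases eq_or_lt_of_le hx with heq | hlt
    · subst heq
      have hstep : tmUpd (some a, some x, none) x = (some a, some x, none) := by
        simp [tmUpd]
      simp only [List.foldl_cons, hstep]
      have hloop : thirdMaxLoop x 1 a (x :: xs) = thirdMaxLoop x 1 a xs := by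
        simp [thirdMaxLoop]
      rw [hloop]
      exact ih a x hba (List.pairwise_cons.mp hpw).2 hxs
    · have hstep : tmUpd (some a, some b, none) x = (some a, some b, some x) := by
        simp only [tmUpd, tmAbove]
        split_ifs <;> simp_all <;> omega
      simp only [List.foldl_cons, hstep]
      rw [tm_frozen xs a b x hlt hba hxs]
      have hloop : thirdMaxLoop b 1 a (x :: xs) = x := by
        simp [thirdMaxLoop, hlt]
      rw [hloop]; rfl

-- phase 0: no strict drop yet (A: temp = a, count = 0  /  B: (some a, none, none))
theorem tm_phase0 (t : List Int) : ∀ (a : Int),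
    t.Pairwise (fun p q => q ≤ p) → (∀ x ∈ t, x ≤ a) →
    thirdMaxLoop a 0 a t = tmOut (t.foldl tmUpd (some a, none, none)) := by
  induction t with
  | nil => intro a _ _; rfl
  | cons x xs ih =>
    intro a hpw hle
    have hx : x ≤ a := hle x (by simp)
    have hxs : ∀ y ∈ xs, y ≤ x := (List.pairwise_cons.mp hpw).1
    rcases eq_or_lt_of_le hx with heq | hlt
    · subst heq
      have hstep : tmUpd (some x, none, none) x = (some x, none, none) := by
        simp [tmUpd]
      simp only [List.foldl_cons, hstep]
      have hloop : thirdMaxLoop x 0 x (x :: xs) = thirdMaxLoop x 0 x xs := by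
        simp [thirdMaxLoop]
      rw [hloop]
      exact ih x (List.pairwise_cons.mp hpw).2 hxs
    · have hstep : tmUpd (some a, none, none) x = (some a, some x, none) := by
        simp only [tmUpd, tmAbove]
        split_ifs <;> simp_all <;> omega
      simp only [List.foldl_cons, hstep]
      have hloop : thirdMaxLoop a 0 a (x :: xs) = thirdMaxLoop x 1 a xs := by
        simp [thirdMaxLoop, hlt]
      rw [hloop]
      exact tm_phase1 xs a x hlt (List.pairwise_cons.mp hpw).2 hxs

-- ===== VERDICT (by name: the statement is the Claim_ definition above) =====
theorem thirdMax_spec : Claim_equal_thirdMax := by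
  intro nums _ hpre
  unfold Spec_thirdMax thirdMax
  show _ = tmOut (nums.foldl tmUpd (none, none, none))
  have hperm := PySem.List.sorted_perm nums (fun x => x) true
  have hnil : PySem.List.sorted nums (fun x => x) true ≠ [] := by
    intro h
    exact hpre ((PySem.List.sorted_eq_nil_iff nums (fun x => x) true).mp h)
  obtain ⟨h, t, hs⟩ := List.exists_cons_of_ne_nil hnil
  have hfold : nums.foldl tmUpd (none, none, none)
      = (h :: t).foldl tmUpd (none, none, none) := by
    rw [fold_eq_st, fold_eq_st]
    rw [hs] at hperm
    exact st_perm hperm.symm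
  have hpw := PySem.List.sorted_pairwise_rev nums (fun x => x)
  rw [hs] at hpw
  have hxs : ∀ y ∈ t, y ≤ h := (List.pairwise_cons.mp hpw).1
  rw [hs, hfold]
  have hstep : tmUpd (none, none, none) h = (some h, none, none) := by
    simp [tmUpd, tmAbove]
  have hloop : thirdMaxLoop h 0 h (h :: t) = thirdMaxLoop h 0 h t := by
    simp [thirdMaxLoop]
  simp only [List.foldl_cons, hstep, hloop]
  exact tm_phase0 t h (List.pairwise_cons.mp hpw).2 hxs
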